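-- pv_equiv track=rewrite | github.com/PurpleRobo/python-mini-challenges | code.py | k_distinct
-- ===== SOURCE A (Python) =====
-- def k_distinct(string, k):
--     a = string.lower()
--     letter_list = []
--
--     for c in a:
--         if c not in letter_list:
--             letter_list.append(c)
--
--     length = len(letter_list)
--
--     if length == k:
--         return True
--     else:
--         return False
-- ===== SOURCE B (Python) =====
-- def k_distinct(string, k):
--     s = sorted(string.lower())
--     count = 0
--     prev = None
--     for c in s:
--         if c != prev:
--             count += 1
--         prev = c
--     return count == k
-- ===== Notes on version B (the rewrite author's own statement) =====
-- stated objective: alternative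
-- what changed: Replaces the quadratic membership-scan accumulation of first occurrences by sorting the lowercased characters and counting distinct values in one adjacency pass over the sorted list.
import Mathlib
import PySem

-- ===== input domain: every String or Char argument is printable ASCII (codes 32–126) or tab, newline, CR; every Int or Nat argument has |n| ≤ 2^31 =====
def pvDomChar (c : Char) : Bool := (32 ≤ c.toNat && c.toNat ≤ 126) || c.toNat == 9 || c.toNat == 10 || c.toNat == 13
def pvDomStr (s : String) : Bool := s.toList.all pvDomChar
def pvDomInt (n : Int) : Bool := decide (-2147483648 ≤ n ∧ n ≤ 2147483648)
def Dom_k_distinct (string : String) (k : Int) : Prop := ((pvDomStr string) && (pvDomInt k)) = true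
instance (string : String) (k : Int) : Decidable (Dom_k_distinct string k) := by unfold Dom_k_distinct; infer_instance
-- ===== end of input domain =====

-- B replaces A's quadratic membership-scan accumulation by sorting the lowercased
-- characters and counting distinct values in a single adjacency pass (alternative algorithm).

-- ===== PORT A =====
def k_distinct (string : String) (k : Int) : Bool :=
  let a := (PySem.Str.lower string).toList
  let letter_list := a.foldl (fun acc c => if c ∈ acc then acc else acc ++ [c]) ([] : List Char)
  let length : Int := letter_list.length
  if length == k then true else false

-- ===== PORT B =====
def k_distinct_alt (string : String) (k : Int) : Bool :=
  let s := PySem.List.sorted (PySem.Str.lower string).toList (fun c => c) false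
  let r := s.foldl
    (fun (st : Int × Option Char) c => (if some c ≠ st.2 then st.1 + 1 else st.1, some c))
    ((0 : Int), (none : Option Char))
  r.1 == k

-- ===== PRECONDITION & SPEC =====
def Spec_k_distinct (string : String) (k : Int) (out : Bool) : Prop := out = k_distinct_alt string k
instance (string : String) (k : Int) (out : Bool) : Decidable (Spec_k_distinct string k out) := by unfold Spec_k_distinct; infer_instance

-- ===== CLAIM (what is proved, stated in full; the proofs are below) =====
def Claim_equal_k_distinct : Prop := ∀ (string : String) (k : Int), Dom_k_distinct string k → Spec_k_distinct string k (k_distinct string k)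

-- ===== LEMMAS AND PROOFS =====

-- A's accumulation: length of the dedup-by-scan fold = card of the distinct chars.
theorem foldlA_length (l : List Char) : ∀ acc : List Char, acc.Nodup →
    (l.foldl (fun acc c => if c ∈ acc then acc else acc ++ [c]) acc).length
      = (acc.toFinset ∪ l.toFinset).card := by
  induction l with
  | nil =>
    intro acc h
    simp [List.card_toFinset, h.dedup]
  | cons c rest ih =>
    intro acc h
    by_cases hc : c ∈ acc
    · have habs : acc.toFinset ∪ (c :: rest).toFinset = acc.toFinset ∪ rest.toFinset := by
        ext x
        simp only [Finset.mem_union, List.mem_toFinset, List.mem_cons]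
        constructor
        · rintro (h1 | (rfl | h2))
          exacts [Or.inl h1, Or.inl hc, Or.inr h2]
        · rintro (h1 | h2)
          exacts [Or.inl h1, Or.inr (Or.inr h2)]
      rw [List.foldl_cons, if_pos hc, ih acc h, ← habs]
    · have hnd : (acc ++ [c]).Nodup := by
        simp [List.nodup_append]
        exact ⟨h, fun a ha h' => hc (h' ▸ ha)⟩
      have hset : (acc ++ [c]).toFinset = insert c acc.toFinset := by
        ext x
        simp only [List.toFinset_append, List.toFinset_cons, List.toFinset_nil,
          Finset.mem_union, Finset.mem_insert, List.mem_toFinset, Finset.mem_singleton, insert_empty_eq]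
        tauto
      have hsw : insert c acc.toFinset ∪ rest.toFinset = acc.toFinset ∪ (c :: rest).toFinset := by
        ext x
        simp only [Finset.mem_union, Finset.mem_insert, List.mem_toFinset, List.mem_cons]
        tauto
      rw [List.foldl_cons, if_neg hc, ih _ hnd, hset, hsw]

def optset : Option Char → Finset Char
  | none => ∅
  | some v => {v}

-- B's adjacency pass on a sorted suffix counts the distinct chars other than prev.
theorem foldlB_count (l : List Char) : ∀ (n : Int) (p : Option Char),
    l.Pairwise (· ≤ ·) → (∀ v, p = some v → ∀ x ∈ l, v ≤ x) →
    (l.foldl (fun (st : Int × Option Char) c =>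
        (if some c ≠ st.2 then st.1 + 1 else st.1, some c)) (n, p)).1
      = n + ((l.toFinset \ optset p).card : Int) := by
  induction l with
  | nil => intro n p _ _; simp
  | cons c rest ih =>
    intro n p hpw hp
    have hcr : ∀ x ∈ rest, c ≤ x := fun x hx => (List.pairwise_cons.mp hpw).1 x hx
    have hrest : rest.Pairwise (· ≤ ·) := (List.pairwise_cons.mp hpw).2
    have hnext : ∀ v, (some c : Option Char) = some v → ∀ x ∈ rest, v ≤ x := by
      intro v hv x hx; cases hv; exact hcr x hx
    by_cases hcp : (some c : Option Char) = p
    · -- no increment; prev stays c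
      rw [List.foldl_cons, if_neg (by simp [hcp]), ih n (some c) hrest hnext]
      subst hcp
      have hsame : (c :: rest).toFinset \ optset (some c) = rest.toFinset \ optset (some c) := by
        simp [optset, List.toFinset_cons, Finset.insert_sdiff_of_mem]
      rw [hsame]
    · -- increment; c is a fresh distinct value
      rw [List.foldl_cons, if_pos (by simp [hcp]), ih (n + 1) (some c) hrest hnext]
      have hfresh : insert c rest.toFinset \ optset p = insert c rest.toFinset := by
        cases p with
        | none => simp [optset]
        | some v =>
          have hvc : v ≤ c := hp v rfl c (by simp)
          have hvne : v ≠ c := fun h => hcp (by rw [h])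
          have hvlt : v < c := lt_of_le_of_ne hvc hvne
          have hvnotin : v ∉ insert c rest.toFinset := by
            simp only [Finset.mem_insert, List.mem_toFinset]
            intro hmem
            rcases hmem with rfl | hx
            · exact lt_irrefl v hvlt
            · exact absurd (hcr v hx) (not_le.mpr hvlt)
          exact Finset.sdiff_eq_self_of_disjoint
            (by simp [optset, Finset.disjoint_singleton_right, hvnotin])
      have hcard : (insert c rest.toFinset).card = (rest.toFinset \ optset (some c)).card + 1 := by
        have h1 : insert c rest.toFinset = insert c (rest.toFinset \ {c}) := by
          ext x; simp; tauto
        rw [h1, Finset.card_insert_of_notMem (by simp)]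
        simp [optset]
      rw [List.toFinset_cons, hfresh, hcard]
      push_cast
      ring

-- ===== VERDICT (by name: the statement is the Claim_ definition above) =====
theorem k_distinct_spec : Claim_equal_k_distinct := by
  intro string k _
  show k_distinct string k = k_distinct_alt string k
  simp only [k_distinct, k_distinct_alt]
  have hperm : (PySem.List.sorted (PySem.Str.lower string).toList (fun c => c) false).Perm
      (PySem.Str.lower string).toList := PySem.List.sorted_perm _ _ _
  have hfinset : (PySem.List.sorted (PySem.Str.lower string).toList (fun c => c) false).toFinset
      = (PySem.Str.lower string).toList.toFinset :=
    Finset.ext fun x => by simp only [List.mem_toFinset]; exact hperm.mem_iff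
  have hpw : (PySem.List.sorted (PySem.Str.lower string).toList (fun c => c) false).Pairwise (· ≤ ·) := by
    have := PySem.List.sorted_pairwise (xs := (PySem.Str.lower string).toList) (key := fun (c : Char) => c)
    simpa using this
  have hA : ((PySem.Str.lower string).toList.foldl
      (fun acc c => if c ∈ acc then acc else acc ++ [c]) ([] : List Char)).length
      = (PySem.Str.lower string).toList.toFinset.card := by
    rw [foldlA_length _ [] List.nodup_nil]; simp
  have hB : ((PySem.List.sorted (PySem.Str.lower string).toList (fun c => c) false).foldl
      (fun (st : Int × Option Char) c =>
        (if some c ≠ st.2 then st.1 + 1 else st.1, some c)) ((0 : Int), (none : Option Char))).1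
      = ((PySem.Str.lower string).toList.toFinset.card : Int) := by
    rw [foldlB_count _ 0 none hpw (by intro v hv; cases hv)]
    simp only [optset, Finset.sdiff_empty, zero_add]
    rw [hfinset]
  rw [hA, hB]
  cases hEq : (((PySem.Str.lower string).toList.toFinset.card : Int) == k) <;> simp_all
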